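-- pv_equiv track=rewrite | github.com/encosoftware/ifps | ShoppingCartAnalysis/Analysis/KeyWord/KeyWord.py | search_similar_keywords
-- ===== SOURCE A (Python) =====
-- def search_similar_keywords(key_word_list):
--     is_in = []
--     counter = {}
--     for key_word in key_word_list:
--         if key_word in is_in:
--             counter[is_in.index(key_word)] += 1
--         else:
--             counter[len(is_in)] = 1
--             is_in.append(key_word)
--
--     return [(is_in[k], v) for k, v in counter.items()]
-- ===== SOURCE B (Python) =====
-- def search_similar_keywords(key_word_list):
--     seen = []
--     for k in key_word_list:
--         if k not in seen:
--             seen.append(k)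
--     return [(k, key_word_list.count(k)) for k in seen]
-- ===== Notes on version B (the rewrite author's own statement) =====
-- stated objective: simpler
-- what changed: Replaces the single pass that maintains a dict of counters keyed by list index (plus a final index-based reconstruction) with a two-phase form: collect distinct keywords in first-seen order, then count each with list.count over the whole input.
import Mathlib
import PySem

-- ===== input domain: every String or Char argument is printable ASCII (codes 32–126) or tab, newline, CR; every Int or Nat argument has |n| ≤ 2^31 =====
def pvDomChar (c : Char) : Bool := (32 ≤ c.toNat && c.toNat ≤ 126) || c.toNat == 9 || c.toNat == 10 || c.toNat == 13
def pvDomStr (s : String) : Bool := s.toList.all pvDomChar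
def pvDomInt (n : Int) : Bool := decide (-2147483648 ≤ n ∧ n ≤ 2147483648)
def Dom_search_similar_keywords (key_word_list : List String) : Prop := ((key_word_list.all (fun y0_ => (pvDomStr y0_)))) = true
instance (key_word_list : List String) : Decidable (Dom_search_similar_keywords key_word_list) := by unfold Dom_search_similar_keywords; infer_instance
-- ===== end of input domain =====

-- B replaces A's one-pass index-keyed counter dict (and its final index-based reconstruction)
-- with a two-phase form: collect distinct keywords first-seen, then one full-list count per
-- keyword (objective: simpler; same asymptotic cost).

-- ===== PORT A =====
-- A's loop body: membership test on the seen-list `is_in`, counter dict keyed by the keyword's index.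
def pvStepA (s : List String × PySem.Dict Int Int) (kw : String) :
    List String × PySem.Dict Int Int :=
  if kw ∈ s.1 then
    (s.1, s.2.modify (Int.ofNat ((PySem.List.index? s.1 kw).getD 0)) 0 (· + 1))
  else
    (s.1 ++ [kw], s.2.insert (Int.ofNat s.1.length) 1)

-- final comprehension: [(is_in[k], v) for k, v in counter.items()]
def pvFinishA (st : List String × PySem.Dict Int Int) : List (String × Int) :=
  st.2.items.map (fun p => (PySem.List.pyGetD st.1 p.1 "", p.2))

def search_similar_keywords (key_word_list : List String) : List (String × Int) :=
  pvFinishA (key_word_list.foldl pvStepA ([], PySem.Dict.empty))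

-- ===== PORT B =====
-- B's first pass: `if k not in seen: seen.append(k)`
def pvSeenB (key_word_list : List String) : List String :=
  key_word_list.foldl (fun acc k => if k ∈ acc then acc else acc ++ [k]) []

def search_similar_keywords_alt (key_word_list : List String) : List (String × Int) :=
  (pvSeenB key_word_list).map (fun k => (k, (PySem.List.count key_word_list k : Int)))

-- ===== PRECONDITION & SPEC =====
def Spec_search_similar_keywords (key_word_list : List String) (out : List (String × Int)) : Prop := out = search_similar_keywords_alt key_word_list
instance (key_word_list : List String) (out : List (String × Int)) : Decidable (Spec_search_similar_keywords key_word_list out) := by unfold Spec_search_similar_keywords; infer_instance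

-- ===== CLAIM (what is proved, stated in full; the proofs are below) =====
def Claim_equal_search_similar_keywords : Prop := ∀ (key_word_list : List String), Dom_search_similar_keywords key_word_list → Spec_search_similar_keywords key_word_list (search_similar_keywords key_word_list)

-- ===== LEMMAS AND PROOFS =====

-- B's seen-loop builds exactly PySem.Set.ofList.
lemma foldl_ite_add (l acc : List String) :
    l.foldl (fun a k => if k ∈ a then a else a ++ [k]) acc = l.foldl PySem.Set.add acc := by
  induction l generalizing acc with
  | nil => rfl
  | cons x xs ih =>
    rw [List.foldl_cons, List.foldl_cons, PySem.Set.add_eq_ite]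
    exact ih _

lemma seenB_eq (l : List String) : pvSeenB l = PySem.Set.ofList l := by
  rw [PySem.Set.ofList_eq_foldl, pvSeenB, foldl_ite_add]

-- Invariant for A's loop: the seen part is ofList l; the dict's keys are 0..len-1 in order
-- and the value at index k is the count so far of the k-th seen keyword.
lemma loopA_inv (l : List String) :
    (l.foldl pvStepA ([], PySem.Dict.empty)).1 = PySem.Set.ofList l ∧
    (l.foldl pvStepA ([], PySem.Dict.empty)).2.keys
      = (List.range (PySem.Set.ofList l).length).map Int.ofNat ∧
    ∀ k : Nat, k < (PySem.Set.ofList l).length →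
      (l.foldl pvStepA ([], PySem.Dict.empty)).2.getD (Int.ofNat k) 0
        = (l.count ((PySem.Set.ofList l).getD k "") : Int) := by
  induction l using List.reverseRecOn with
  | nil => refine ⟨rfl, rfl, ?_⟩; intro k hk; simp [PySem.Set.ofList] at hk
  | append_singleton l x ih =>
    obtain ⟨ih1, ih2, ih3⟩ := ih
    set s := PySem.Set.ofList l with hs
    set d := (l.foldl pvStepA ([], PySem.Dict.empty)).2 with hd
    have hfold : (l ++ [x]).foldl pvStepA ([], PySem.Dict.empty)
        = pvStepA ((l.foldl pvStepA ([], PySem.Dict.empty)).1, d) x := by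
      rw [List.foldl_append]; rfl
    rw [ih1] at hfold
    have hnodup : s.Nodup := PySem.Set.nodup_ofList l
    have hofl : PySem.Set.ofList (l ++ [x]) = PySem.Set.add s x :=
      PySem.Set.ofList_append_singleton l x
    by_cases hx : x ∈ s
    · -- existing keyword: modify at its index
      cases hopt : PySem.List.index? s x with
      | none => exact absurd hx ((PySem.List.index?_eq_none_iff s x).mp hopt)
      | some i =>
        obtain ⟨hik, hsi, -⟩ := PySem.List.getElem_of_index?_eq_some hopt
        have hopt' : List.idxOf? x s = some i := by
          rw [← PySem.List.index?_eq_idxOf?]; exact hopt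
        have hstep : pvStepA (s, d) x = (s, d.modify (Int.ofNat i) 0 (· + 1)) := by
          simp [pvStepA, hx, hopt']
        have hadd : PySem.Set.add s x = s := PySem.Set.add_of_mem hx
        rw [hfold, hstep]
        refine ⟨by rw [hofl, hadd], ?_, ?_⟩
        · -- keys unchanged: the modified key is already present
          have hcont : d.contains (Int.ofNat i) = true := by
            rw [PySem.Dict.contains_eq_decide_mem_keys, ih2]
            simp only [decide_eq_true_eq, List.mem_map, List.mem_range]
            exact ⟨i, hik, rfl⟩
          rw [hofl, hadd, PySem.Dict.keys_modify,
              PySem.Dict.keys_insert_of_contains _ _ hcont, ih2]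
        · intro k hk
          rw [hofl, hadd] at hk ⊢
          rw [PySem.Dict.getD_modify]
          by_cases hki : Int.ofNat k = Int.ofNat i
          · have hki' : k = i := Int.ofNat.inj hki
            subst hki'
            rw [if_pos hki, ih3 k hk]
            have hgx : s.getD k "" = x := by rw [List.getD_eq_getElem s "" hk]; exact hsi
            rw [hgx, List.count_append]
            simp
          · rw [if_neg hki]
            have hki' : k ≠ i := fun h => hki (congrArg Int.ofNat h)
            have hne : s.getD k "" ≠ x := by
              rw [List.getD_eq_getElem s "" hk]
              intro h
              exact hki' ((List.Nodup.getElem_inj_iff hnodup).mp (h.trans hsi.symm))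
            have hc0 : List.count (s.getD k "") [x] = 0 := by
              simp only [List.count_eq_zero, List.mem_singleton]
              exact fun h => hne h
            rw [ih3 k hk, List.count_append, hc0, Nat.add_zero]
    · -- new keyword: append it, insert a fresh key
      have hstep : pvStepA (s, d) x = (s ++ [x], d.insert (Int.ofNat s.length) 1) := by
        simp [pvStepA, hx]
      have hadd : PySem.Set.add s x = s ++ [x] := PySem.Set.add_of_not_mem hx
      have hxl : x ∉ l := fun h => hx ((PySem.Set.mem_ofList l x).mpr h)
      have hncont : d.contains (Int.ofNat s.length) = false := by
        rw [PySem.Dict.contains_eq_decide_mem_keys, ih2]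
        simp only [decide_eq_false_iff_not, List.mem_map, List.mem_range]
        rintro ⟨n, hn, hcast⟩
        have : n = s.length := Int.ofNat.inj hcast
        omega
      rw [hfold, hstep]
      refine ⟨by rw [hofl, hadd], ?_, ?_⟩
      · rw [PySem.Dict.keys_insert_of_not_contains _ _ hncont, ih2, hofl, hadd,
            List.length_append, List.length_singleton, List.range_succ, List.map_append]
        rfl
      · intro k hk
        rw [hofl, hadd] at hk ⊢
        simp only [List.length_append, List.length_singleton] at hk
        rw [PySem.Dict.getD_insert]
        by_cases hke : Int.ofNat k = Int.ofNat s.length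
        · have hke' : k = s.length := Int.ofNat.inj hke
          subst hke'
          rw [if_pos hke]
          have hgd : (s ++ [x]).getD s.length "" = x := by
            rw [List.getD_eq_getElem _ "" (by simp)]
            simp
          rw [hgd, List.count_append, List.count_eq_zero_of_not_mem hxl]
          simp
        · rw [if_neg hke]
          have hke' : k ≠ s.length := fun h => hke (congrArg Int.ofNat h)
          have hk' : k < s.length := by omega
          have hgd : (s ++ [x]).getD k "" = s.getD k "" := by
            rw [List.getD_eq_getElem _ "" (by simp; omega), List.getD_eq_getElem s "" hk']
            exact List.getElem_append_left _
          have hmem : s.getD k "" ∈ s := by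
            rw [List.getD_eq_getElem s "" hk']; exact List.getElem_mem _
          have hne : s.getD k "" ≠ x := fun h => hx (h ▸ hmem)
          have hc0 : List.count (s.getD k "") [x] = 0 := by
            simp only [List.count_eq_zero, List.mem_singleton]
            exact fun h => hne h
          rw [hgd, ih3 k hk', List.count_append, hc0, Nat.add_zero]

-- reading a list back through range-indexed defaults is the list itself (mapped)
lemma map_range_getD {α β : Type} [Inhabited α] (s : List α) (dflt : α) (f : α → β) :
    (List.range s.length).map (fun i => f (s.getD i dflt)) = s.map f := by
  apply List.ext_getElem
  · simp
  · intro i h1 h2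
    simp only [List.getElem_map, List.getElem_range]
    rw [List.getD_eq_getElem s dflt (by simpa using h2)]

-- ===== VERDICT (by name: the statement is the Claim_ definition above) =====
theorem search_similar_keywords_spec : Claim_equal_search_similar_keywords := by
  unfold Claim_equal_search_similar_keywords
  intro l _
  unfold Spec_search_similar_keywords search_similar_keywords search_similar_keywords_alt pvFinishA
  obtain ⟨h1, h2, h3⟩ := loopA_inv l
  rw [seenB_eq]
  set st := l.foldl pvStepA ([], PySem.Dict.empty) with hst
  have hnodupk : st.2.keys.Nodup := by
    rw [h2]
    refine List.Nodup.map ?_ List.nodup_range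
    exact fun a b h => Int.ofNat.inj h
  rw [PySem.Dict.items_eq_map_keys st.2 hnodupk 0, h2, h1, List.map_map, List.map_map]
  have hcong : ∀ k ∈ List.range (PySem.Set.ofList l).length,
      (((fun p : Int × Int => (PySem.List.pyGetD (PySem.Set.ofList l) p.1 "", p.2)) ∘
        (fun k : Int => (k, st.2.getD k 0))) ∘ Int.ofNat) k
      = (fun k : Nat => ((PySem.Set.ofList l).getD k "",
          ((l.count ((PySem.Set.ofList l).getD k "") : Nat) : Int))) k := by
    intro k hk
    simp only [List.mem_range] at hk
    simp only [Function.comp]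
    rw [h3 k hk]
    have : PySem.List.pyGetD (PySem.Set.ofList l) (Int.ofNat k) ""
        = (PySem.Set.ofList l).getD k "" := PySem.List.pyGetD_natCast _ _ _
    rw [this]
  rw [List.map_congr_left hcong,
      map_range_getD (PySem.Set.ofList l) "" (fun k => (k, ((l.count k : Nat) : Int)))]
  simp only [PySem.List.count_eq]
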